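-- pv_equiv track=rewrite | github.com/dlowder-salesforce/advent2016 | advent04.py | frequencyMap
-- ===== SOURCE A (Python) =====
-- letters = ['a','b','c','d','e','f','g','h','i','j','k','l','m','n','o','p','q','r','s','t','u','v','w','x','y','z'];
--
-- def frequencyMap(s):
--     m = {}
--     for i in range(len(letters)):
--         m[letters[i]] = s.count(letters[i])
--     output = ""
--     for i in range(len(s), 0, -1):
--         for j in range(len(letters)):
--             if m[letters[j]] == i:
--                 output += letters[j]
--     return output
-- ===== SOURCE B (Python) =====
-- def frequencyMap(s):
--     count = {}
--     for ch in s: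
--         if 'a' <= ch <= 'z':
--             count[ch] = count.get(ch, 0) + 1
--     buckets = {}
--     for ch in sorted(count):
--         buckets.setdefault(count[ch], []).append(ch)
--     out = []
--     for c in range(max(count.values(), default=0), 0, -1):
--         out.extend(buckets.get(c, []))
--     return "".join(out)
-- ===== Notes on version B (the rewrite author's own statement) =====
-- stated objective: faster
-- what changed: A builds the count map by 26 full string scans and then, for every frequency from len(s) down to 1, rescans all 26 letters; B tallies a-z in one pass over the string, buckets the occurring letters (taken in sorted order) by their count, and concatenates buckets from the maximum count down, so no per-frequency rescan of the alphabet remains.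
import Mathlib
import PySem

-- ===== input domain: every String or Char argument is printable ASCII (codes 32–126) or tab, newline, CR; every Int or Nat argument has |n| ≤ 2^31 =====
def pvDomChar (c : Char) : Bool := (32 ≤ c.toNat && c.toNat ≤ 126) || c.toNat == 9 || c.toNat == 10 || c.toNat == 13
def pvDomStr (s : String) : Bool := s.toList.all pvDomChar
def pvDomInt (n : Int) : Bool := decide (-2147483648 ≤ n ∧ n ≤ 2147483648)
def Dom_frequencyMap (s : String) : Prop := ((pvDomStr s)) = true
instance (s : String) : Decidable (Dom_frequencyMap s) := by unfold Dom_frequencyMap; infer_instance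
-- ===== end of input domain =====

-- B replaces A's 26 counting scans and per-frequency alphabet rescans by one tally pass,
-- count-keyed buckets, and one walk from the maximum count down (objective: faster).

-- ===== PORT A =====
def lettersA : List Char :=
  ['a','b','c','d','e','f','g','h','i','j','k','l','m',
   'n','o','p','q','r','s','t','u','v','w','x','y','z']

def frequencyMap (s : String) : String :=
  -- m[letters[i]] = s.count(letters[i]); the later read m[letters[j]] always finds its
  -- key (all 26 letters were inserted), so the dict access is ported as getD.
  let m : PySem.Dict Char Int :=
    (PySem.List.pyRange 0 (lettersA.length : Int) 1).foldl
      (fun d i =>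
        let c := PySem.List.pyGetD lettersA i ' '
        d.insert c ((PySem.Str.count s (String.ofList [c]) : Int)))
      PySem.Dict.empty
  let output : List Char :=
    (PySem.List.pyRange (PySem.Str.len s) 0 (-1)).foldl
      (fun out i =>
        (PySem.List.pyRange 0 (lettersA.length : Int) 1).foldl
          (fun out j =>
            let c := PySem.List.pyGetD lettersA j ' '
            if m.getD c 0 == i then out ++ [c] else out)
          out)
      []
  String.ofList output

-- ===== PORT B =====
def frequencyMap_alt (s : String) : String :=
  let count : PySem.Dict Char Int :=
    s.toList.foldl
      (fun d ch => if 'a' ≤ ch ∧ ch ≤ 'z' then d.insert ch (d.getD ch 0 + 1) else d)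
      PySem.Dict.empty
  -- buckets.setdefault(count[ch], []).append(ch): count[ch] always finds its key
  -- (ch ranges over count's keys) so it is ported as getD; setdefault+append is Dict.modify.
  let buckets : PySem.Dict Int (List Char) :=
    (PySem.List.sorted count.keys (fun x => x)).foldl
      (fun d ch => d.modify (count.getD ch 0) [] (fun l => l ++ [ch]))
      PySem.Dict.empty
  let out : List Char :=
    (PySem.List.pyRange (PySem.List.maxD count.values (fun x => x) 0) 0 (-1)).foldl
      (fun acc c => acc ++ buckets.getD c [])
      []
  String.ofList out

-- ===== PRECONDITION & SPEC =====
def Spec_frequencyMap (s : String) (out : String) : Prop := out = frequencyMap_alt s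
instance (s : String) (out : String) : Decidable (Spec_frequencyMap s out) := by unfold Spec_frequencyMap; infer_instance

-- ===== CLAIM (what is proved, stated in full; the proofs are below) =====
def Claim_equal_frequencyMap : Prop := ∀ (s : String), Dom_frequencyMap s → Spec_frequencyMap s (frequencyMap s)

-- ===== LEMMAS AND PROOFS =====

-- the letters whose frequency in s is exactly i, in alphabetical order
def pvSeg (s : String) (i : Int) : List Char :=
  lettersA.filter (fun c => ((s.toList.count c : Int) == i))

theorem pv_go_singleton (c : Char) : ∀ (fuel : Nat) (l : List Char) (acc : Nat), l.length ≤ fuel →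
    PySem.Chars.count.go [c] fuel l acc = acc + l.count c := by
  intro fuel
  induction fuel with
  | zero => intro l acc h; cases l with
    | nil => simp [PySem.Chars.count.go]
    | cons x t => simp at h
  | succ n ih => intro l acc h; cases l with
    | nil => simp [PySem.Chars.count.go]
    | cons x t =>
      rw [PySem.Chars.count.go]
      by_cases hx : x = c
      · subst hx
        simp [List.isPrefixOf, ih t (acc+1) (by simpa using h)]
        omega
      · have : ([c].isPrefixOf (x :: t)) = false := by
          simp [List.isPrefixOf]; exact fun h => absurd h.symm hx
        simp [this, hx, ih t acc (by simpa using h)]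

-- Python's s.count(c) for a single character c is the plain character count
theorem pv_count_singleton (cs : List Char) (c : Char) : PySem.Chars.count cs [c] = cs.count c := by
  simpa [PySem.Chars.count] using pv_go_singleton c cs.length cs 0 le_rfl

theorem pv_mem_lettersA (c : Char) : c ∈ lettersA ↔ ('a' ≤ c ∧ c ≤ 'z') := by
  constructor
  · intro h; fin_cases h <;> refine ⟨by decide, by decide⟩
  · rintro ⟨h1, h2⟩
    have h1' : 97 ≤ c.toNat := by
      simpa [Char.le_def, UInt32.le_iff_toNat_le] using h1
    have h2' : c.toNat ≤ 122 := by
      simpa [Char.le_def, UInt32.le_iff_toNat_le] using h2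
    have hc := Char.ofNat_toNat c
    set n := c.toNat with hn
    interval_cases n <;> (rw [← hc]; decide)

-- ----- A's normal form -----
def pvCntDict (s : String) : PySem.Dict Char Int :=
  (PySem.List.pyRange 0 (lettersA.length : Int) 1).foldl
    (fun d i => d.insert (PySem.List.pyGetD lettersA i ' ')
      ((PySem.Str.count s (String.ofList [PySem.List.pyGetD lettersA i ' ']) : Int)))
    PySem.Dict.empty

theorem pvCntDict_eq (s : String) :
    pvCntDict s = lettersA.foldl
      (fun d c => d.insert c ((PySem.Str.count s (String.ofList [c]) : Int))) PySem.Dict.empty := by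
  unfold pvCntDict
  rw [PySem.List.foldl_pyRange_zero_pyGetD' (xs := lettersA) (d := ' ')
        (f := fun d c => d.insert c ((PySem.Str.count s (String.ofList [c]) : Int)))
        (init := (PySem.Dict.empty : PySem.Dict Char Int))]

theorem pv_mDict (s : String) (c : Char) (hc : c ∈ lettersA) :
    (pvCntDict s).getD c 0 = (s.toList.count c : Int) := by
  rw [pvCntDict_eq]
  have hitems := PySem.Dict.items_foldl_insert_fresh (l := lettersA)
      (k := fun c => c) (v := fun c => ((PySem.Str.count s (String.ofList [c]) : Int)))
      (d := PySem.Dict.empty) (by intro a _; simp [pysem]) (by simpa using (by decide : lettersA.Nodup))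
  have hkeysnd : (lettersA.foldl
      (fun d c => d.insert c ((PySem.Str.count s (String.ofList [c]) : Int)))
      (PySem.Dict.empty : PySem.Dict Char Int)).keys.Nodup := by
    apply PySem.Dict.nodup_keys_foldl_insert
    simp [pysem]
  have hmem : (c, ((PySem.Str.count s (String.ofList [c]) : Int))) ∈ (lettersA.foldl
      (fun d c => d.insert c ((PySem.Str.count s (String.ofList [c]) : Int)))
      (PySem.Dict.empty : PySem.Dict Char Int)).items := by
    rw [hitems]
    simp only [List.mem_append, List.mem_map]
    exact Or.inr ⟨c, hc, rfl⟩
  rw [PySem.Dict.getD_of_mem_items _ hmem hkeysnd 0, PySem.Str.count_eq]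
  simp [pv_count_singleton]

theorem pvA_step (s : String) :
    frequencyMap s = String.ofList
      ((PySem.List.pyRange (PySem.Str.len s) 0 (-1)).foldl
        (fun out i =>
          (PySem.List.pyRange 0 (lettersA.length : Int) 1).foldl
            (fun out j =>
              if (pvCntDict s).getD (PySem.List.pyGetD lettersA j ' ') 0 == i
              then out ++ [PySem.List.pyGetD lettersA j ' '] else out)
            out)
        []) := by
  rw [frequencyMap.eq_def]
  simp only []
  rw [← pvCntDict.eq_def]

theorem pvA_eq (s : String) :
    frequencyMap s =
      String.ofList ((PySem.List.pyRange (s.toList.length : Int) 0 (-1)).flatMap (pvSeg s)) := by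
  rw [pvA_step]
  have hval : ∀ c ∈ lettersA, (pvCntDict s).getD c 0 = (s.toList.count c : Int) :=
    fun c hc => pv_mDict s c hc
  generalize (pvCntDict s) = D at hval ⊢
  have hlen : PySem.Str.len s = (s.toList.length : Int) := by simp [PySem.Str.len_eq]
  rw [hlen]
  congr 1
  have hinner : ∀ (acc : List Char) (i : Int),
      (PySem.List.pyRange 0 (lettersA.length : Int) 1).foldl
        (fun out j =>
          if D.getD (PySem.List.pyGetD lettersA j ' ') 0 == i
          then out ++ [PySem.List.pyGetD lettersA j ' '] else out) acc
      = acc ++ pvSeg s i := by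
    intro acc i
    rw [PySem.List.foldl_pyRange_zero_pyGetD' (xs := lettersA) (d := ' ')
          (f := fun out c => if D.getD c 0 == i then out ++ [c] else out)
          (init := acc)]
    rw [PySem.List.foldl_append_if_eq_filter (fun c => D.getD c 0 == i) lettersA acc]
    unfold pvSeg
    congr 1
    apply List.filter_congr
    intro c hc
    rw [hval c hc]
  rw [PySem.List.foldl_congr_mem _ _ (fun out i => out ++ pvSeg s i) _
        (fun acc i _ => hinner acc i)]
  rw [PySem.List.foldl_append_eq_flatMap]
  simp

-- ----- B's normal form -----
def pvFs (s : String) : List Char := s.toList.filter (fun ch => decide ('a' ≤ ch ∧ ch ≤ 'z'))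
def pvCount (s : String) : PySem.Dict Char Int := PySem.Dict.counter (pvFs s)
def pvOcc (s : String) : List Char := lettersA.filter (fun c => !(s.toList.count c == 0))
def pvBuckets (s : String) : PySem.Dict Int (List Char) :=
  (pvOcc s).foldl (fun d ch => d.modify ((s.toList.count ch : Int)) [] (fun l => l ++ [ch])) PySem.Dict.empty
def pvM (s : String) : Int := PySem.List.maxD (pvCount s).values (fun x => x) 0

theorem pv_count_fs (s : String) (c : Char) (hc : c ∈ lettersA) :
    (pvFs s).count c = s.toList.count c := by
  unfold pvFs
  exact List.count_filter (by simpa using (pv_mem_lettersA c).mp hc)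

-- the sorted keys of the tally are exactly the occurring letters, alphabetically
theorem pv_sorted_keys (s : String) :
    PySem.List.sorted (PySem.Set.ofList (pvFs s)) (fun x => x) = pvOcc s := by
  apply PySem.List.sorted_eq_of_perm_of_pairwise_lt
  · unfold pvOcc
    rw [List.perm_ext_iff_of_nodup (List.Nodup.filter _ (by decide)) (PySem.Set.nodup_ofList _)]
    intro c
    rw [PySem.Set.mem_ofList]
    unfold pvFs
    simp only [List.mem_filter, pv_mem_lettersA, decide_eq_true_eq, Bool.not_eq_true',
      beq_eq_false_iff_ne, ne_eq]
    constructor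
    · rintro ⟨hl, hcnt⟩
      exact ⟨List.count_pos_iff.mp (Nat.pos_of_ne_zero hcnt), hl⟩
    · rintro ⟨hmem, hl⟩
      have := List.count_pos_iff.mpr hmem
      exact ⟨hl, by omega⟩
  · exact List.Pairwise.sublist List.filter_sublist (by decide : lettersA.Pairwise (· < ·))

theorem pv_buckets_getD (s : String) (i : Int) :
    (pvBuckets s).getD i [] = (pvOcc s).filter (fun c => ((s.toList.count c : Int) == i)) := by
  unfold pvBuckets
  rw [show ((pvOcc s).foldl (fun d ch => d.modify ((s.toList.count ch : Int)) [] (fun l => l ++ [ch])) PySem.Dict.empty)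
      = (((pvOcc s).map (fun ch => ((s.toList.count ch : Int), ch))).foldl
          (fun d p => d.modify p.1 [] (fun l => l ++ [p.2])) PySem.Dict.empty)
      from (List.foldl_map (f := fun ch => ((s.toList.count ch : Int), ch))
              (g := fun d p => d.modify p.1 [] (fun l => l ++ [p.2]))
              (l := pvOcc s) (init := PySem.Dict.empty)).symm]
  rw [PySem.Dict.getD_foldl_modify_append]
  rw [List.filter_map]
  simp [Function.comp_def]

theorem pv_seg_of_pos (s : String) (i : Int) (hi : 1 ≤ i) :
    (pvOcc s).filter (fun c => ((s.toList.count c : Int) == i)) = pvSeg s i := by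
  unfold pvOcc pvSeg
  rw [List.filter_filter]
  apply List.filter_congr
  intro c _
  by_cases h : (s.toList.count c : Int) = i
  · have : s.toList.count c ≠ 0 := by omega
    simp [h, this]
  · simp [h]

theorem pvB_step (s : String) :
    frequencyMap_alt s = String.ofList
      ((PySem.List.pyRange (pvM s) 0 (-1)).foldl
        (fun acc i => acc ++ (pvBuckets s).getD i []) []) := by
  rw [frequencyMap_alt.eq_def]
  simp only []
  rw [PySem.List.foldl_ite_eq_foldl_filter (p := fun ch => 'a' ≤ ch ∧ ch ≤ 'z')
        (f := fun d ch => d.insert ch (d.getD ch 0 + 1)) (l := s.toList)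
        (init := (PySem.Dict.empty : PySem.Dict Char Int))]
  rw [PySem.Dict.foldl_insert_getD_add_one_eq_counter]
  rw [← pvFs.eq_def, ← pvCount.eq_def, ← pvM.eq_def]
  have hkeys : (pvCount s).keys = PySem.Set.ofList (pvFs s) := by
    unfold pvCount; exact PySem.Dict.keys_counter _
  rw [hkeys, pv_sorted_keys]
  have hb : (pvOcc s).foldl
      (fun d ch => d.modify ((pvCount s).getD ch 0) [] (fun l => l ++ [ch])) PySem.Dict.empty
      = pvBuckets s := by
    unfold pvBuckets
    apply PySem.List.foldl_congr_mem
    intro acc c hc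
    have hcl : c ∈ lettersA := List.mem_of_mem_filter hc
    have : (pvCount s).getD c 0 = (s.toList.count c : Int) := by
      unfold pvCount
      rw [PySem.Dict.getD_counter, pv_count_fs s c hcl]
    rw [this]
  rw [hb]

theorem pv_M_nonneg (s : String) : 0 ≤ pvM s := by
  unfold pvM
  rcases List.eq_nil_or_concat (pvCount s).values with h | ⟨l, a, h⟩
  · rw [h, PySem.List.maxD_nil]
  · have hne : (pvCount s).values ≠ [] := by simp [h]
    have hmem := PySem.List.maxD_mem (pvCount s).values (fun x => x) 0 hne
    have : ∀ v ∈ (pvCount s).values, 0 ≤ v := by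
      intro v hv
      unfold pvCount at hv
      simp only [PySem.Dict.values, PySem.Dict.items_counter, List.map_map, List.mem_map] at hv
      obtain ⟨k, _, hk⟩ := hv
      simp only [Function.comp] at hk
      omega
    exact this _ hmem

theorem pv_M_le (s : String) : pvM s ≤ (s.toList.length : Int) := by
  unfold pvM
  rcases List.eq_nil_or_concat (pvCount s).values with h | ⟨l, a, h⟩
  · rw [h, PySem.List.maxD_nil]; positivity
  · have hne : (pvCount s).values ≠ [] := by simp [h]
    have hmem := PySem.List.maxD_mem (pvCount s).values (fun x => x) 0 hne
    revert hmem
    generalize PySem.List.maxD (pvCount s).values (fun x => x) 0 = M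
    intro hmem
    unfold pvCount at hmem
    simp only [PySem.Dict.values, PySem.Dict.items_counter, List.map_map, List.mem_map] at hmem
    obtain ⟨k, _, hk⟩ := hmem
    simp only [Function.comp] at hk
    have h1 : (pvFs s).count k ≤ (pvFs s).length := List.count_le_length
    have h2 : (pvFs s).length ≤ s.toList.length := by
      unfold pvFs; exact List.length_filter_le _ _
    omega

theorem pv_seg_gt_M (s : String) (i : Int) (hi : pvM s < i) : pvSeg s i = [] := by
  unfold pvSeg
  rw [List.filter_eq_nil_iff]
  intro c hc hcnt
  simp only [beq_iff_eq] at hcnt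
  have hM0 := pv_M_nonneg s
  have hpos : 0 < s.toList.count c := by omega
  have hmemfs : c ∈ pvFs s := by
    unfold pvFs
    rw [List.mem_filter]
    exact ⟨List.count_pos_iff.mp hpos, by simpa using (pv_mem_lettersA c).mp hc⟩
  have hval : ((pvFs s).count c : Int) ∈ (pvCount s).values := by
    unfold pvCount
    simp only [PySem.Dict.values, PySem.Dict.items_counter, List.map_map, List.mem_map]
    exact ⟨c, by rw [PySem.Set.mem_ofList]; exact hmemfs, rfl⟩
  have := PySem.List.le_maxD_id (pvCount s).values 0 _ hval
  rw [pv_count_fs s c hc] at this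
  unfold pvM at hi
  omega

theorem pvB_eq (s : String) :
    ∃ M : Int, 0 ≤ M ∧ M ≤ (s.toList.length : Int) ∧
      (∀ i : Int, M < i → pvSeg s i = []) ∧
      frequencyMap_alt s = String.ofList ((PySem.List.pyRange M 0 (-1)).flatMap (pvSeg s)) := by
  refine ⟨pvM s, pv_M_nonneg s, pv_M_le s, fun i hi => pv_seg_gt_M s i hi, ?_⟩
  rw [pvB_step]
  congr 1
  rw [PySem.List.foldl_congr_mem _ _ (fun acc i => acc ++ pvSeg s i) _ ?_]
  · rw [PySem.List.foldl_append_eq_flatMap]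
    simp
  · intro acc i hi
    rw [PySem.List.mem_pyRange_neg_one] at hi
    rw [pv_buckets_getD, pv_seg_of_pos s i (by omega)]

-- ===== VERDICT (by name: the statement is the Claim_ definition above) =====
theorem frequencyMap_spec : Claim_equal_frequencyMap := by
  intro s _
  unfold Spec_frequencyMap
  obtain ⟨M, hM0, hMN, hseg, hB⟩ := pvB_eq s
  rw [pvA_eq s, hB]
  have hsplit : PySem.List.pyRange ((s.toList.length : Int)) 0 (-1)
      = (PySem.List.pyRange (M+1) ((s.toList.length : Int)+1) 1).reverse ++ PySem.List.pyRange M 0 (-1) := by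
    rw [PySem.List.pyRange_neg_one_eq_reverse, PySem.List.pyRange_neg_one_eq_reverse,
        PySem.List.pyRange_one_append (0+1) (M+1) ((s.toList.length : Int)+1) (by omega) (by omega),
        List.reverse_append]
  rw [hsplit, List.flatMap_append]
  have hnil : ((PySem.List.pyRange (M+1) ((s.toList.length : Int)+1) 1).reverse.flatMap (pvSeg s)) = [] := by
    rw [List.flatMap_eq_nil_iff]
    intro i hi
    rw [List.mem_reverse, PySem.List.mem_pyRange_one] at hi
    exact hseg i (by omega)
  rw [hnil, List.nil_append]
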